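-- pv_equiv track=rewrite | github.com/BradleyCharles/webappdevad320 | ad325/Week 3/cone.py | coneCheck
-- ===== SOURCE A (Python) =====
-- def coneCheck(stock):
--     length = len(stock)
--
--     if length < 3:
--         return False
--
--     for index in range(1, length - 1):
--         if stock[index] > stock[index - 1] and stock[index] > stock[index + 1]:
--             return True
--     return False
-- ===== SOURCE B (Python) =====
-- def coneCheck(stock):
--     # Encode each consecutive step as a character ('u' = up, 'd' = down,
--     # 'e' = equal) and detect a peak as the substring 'ud' in that string.
--     signs = ''.join('u' if b > a else ('d' if b < a else 'e')
--                     for a, b in zip(stock, stock[1:]))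
--     return 'ud' in signs
-- ===== Notes on version B (the rewrite author's own statement) =====
-- stated objective: alternative
-- what changed: B encodes the step sequence as a string of 'u'/'d'/'e' sign characters and reduces peak detection to the substring test 'ud' in that string, replacing A's indexed loop of triple comparisons with string pattern matching.
import Mathlib
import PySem

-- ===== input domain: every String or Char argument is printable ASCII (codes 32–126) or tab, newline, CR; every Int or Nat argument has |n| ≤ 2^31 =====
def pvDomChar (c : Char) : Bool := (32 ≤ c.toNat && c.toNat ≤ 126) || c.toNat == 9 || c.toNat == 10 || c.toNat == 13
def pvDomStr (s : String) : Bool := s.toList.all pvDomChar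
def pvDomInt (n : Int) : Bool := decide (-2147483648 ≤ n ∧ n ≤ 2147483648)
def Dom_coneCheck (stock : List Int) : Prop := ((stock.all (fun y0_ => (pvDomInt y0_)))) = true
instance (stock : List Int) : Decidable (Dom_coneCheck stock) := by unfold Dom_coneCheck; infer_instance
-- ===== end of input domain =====

-- B encodes the steps as a string of 'u'/'d'/'e' sign characters and detects a
-- peak as the substring 'ud', replacing A's indexed triple-comparison loop
-- (objective: alternative).

-- ===== PORT A =====
-- the for-loop with early return, as recursion over the index list
def coneLoop (stock : List Int) : List Int → Bool
  | [] => false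
  | i :: rest =>
      if PySem.List.pyGetD stock i 0 > PySem.List.pyGetD stock (i - 1) 0 ∧
         PySem.List.pyGetD stock i 0 > PySem.List.pyGetD stock (i + 1) 0 then
        true
      else coneLoop stock rest

def coneCheck (stock : List Int) : Bool :=
  let length : Int := stock.length
  if length < 3 then false
  else coneLoop stock (PySem.List.pyRange 1 (length - 1) 1)

-- ===== PORT B =====
-- ''.join over zip(stock, stock[1:]) of one-character strings is the list of
-- those characters; 'ud' in signs is PySem.Chars.isIn on that list (exact).
def coneCheck_alt (stock : List Int) : Bool :=
  let signs : List Char :=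
    (stock.zip (PySem.List.slice stock (some 1) none)).map
      (fun p => if p.2 > p.1 then 'u' else if p.2 < p.1 then 'd' else 'e')
  PySem.Chars.isIn ['u', 'd'] signs

-- ===== PRECONDITION & SPEC =====
def Spec_coneCheck (stock : List Int) (out : Bool) : Prop := out = coneCheck_alt stock
instance (stock : List Int) (out : Bool) : Decidable (Spec_coneCheck stock out) := by unfold Spec_coneCheck; infer_instance

-- ===== CLAIM (what is proved, stated in full; the proofs are below) =====
def Claim_equal_coneCheck : Prop := ∀ (stock : List Int), Dom_coneCheck stock → Spec_coneCheck stock (coneCheck stock)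

-- ===== LEMMAS AND PROOFS =====

-- common characterisation: an interior strict peak, by structural recursion
def peak3 : List Int → Bool
  | a :: b :: c :: rest => if b > a ∧ b > c then true else peak3 (b :: c :: rest)
  | _ => false

lemma peak3_short (l : List Int) (h : l.length < 3) : peak3 l = false := by
  match l with
  | [] => rfl
  | [_] => rfl
  | [_, _] => rfl
  | _ :: _ :: _ :: _ => simp at h; omega

-- proof-side abbreviation for B's sign-character list
def sg (l : List Int) : List Char :=
  (l.zip l.tail).map (fun p : Int × Int => if p.2 > p.1 then 'u' else if p.2 < p.1 then 'd' else 'e')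

lemma sg_cons (a b : Int) (l : List Int) :
    sg (a :: b :: l) = (if b > a then 'u' else if b < a then 'd' else 'e') :: sg (b :: l) := by
  simp [sg]

-- the substring test on the sign list equals peak3
lemma infix_sg_iff_peak3 (stock : List Int) :
    (['u', 'd'] <:+: sg stock) ↔ peak3 stock = true := by
  induction stock with
  | nil => simp [sg, peak3]
  | cons a l ih =>
    match l, ih with
    | [], _ => simp [sg, peak3]
    | [b], _ =>
      simp only [sg, peak3]
      constructor
      · intro h
        exfalso
        have := h.length_le
        simp at this
      · intro h; simp at h
    | b :: c :: r, ih =>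
      rw [sg_cons a b (c :: r)] at *
      simp only [peak3]
      by_cases h : b > a ∧ b > c
      · have hu : (if b > a then 'u' else if b < a then 'd' else 'e') = 'u' := by
          rw [if_pos h.1]
        have hd : sg (b :: c :: r) =
            'd' :: sg (c :: r) := by
          rw [sg_cons b c r, if_neg (by omega : ¬ c > b), if_pos (by omega : c < b)]
        rw [if_pos h, hu, hd]
        constructor
        · intro _; rfl
        · intro _
          exact ⟨[], ('d' :: sg (c :: r)).drop 1, by simp⟩
      · rw [if_neg h]
        rw [← ih]
        constructor
        · intro hin
          rcases List.infix_cons_iff.mp hin with hpre | hinf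
          · exfalso
            rcases hpre with ⟨t, ht⟩
            have hd0 : sg (b :: c :: r) =
                (if c > b then 'u' else if c < b then 'd' else 'e') :: sg (c :: r) := sg_cons b c r
            rw [hd0] at ht
            simp at ht
            rcases ht with ⟨h1, h2, -⟩
            split_ifs at h1 h2 <;> simp_all
          · exact hinf
        · intro hinf
          exact List.infix_cons hinf

lemma alt_eq_peak3 (stock : List Int) : coneCheck_alt stock = peak3 stock := by
  unfold coneCheck_alt
  simp only [PySem.List.slice_from_one]
  have hl : (stock.zip stock.tail).map
      (fun p => if p.2 > p.1 then 'u' else if p.2 < p.1 then 'd' else 'e') = sg stock := rfl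
  rw [hl]
  by_cases h : peak3 stock = true
  · rw [h, (PySem.Chars.isIn_iff_infix _ _).mpr ((infix_sg_iff_peak3 stock).mpr h)]
  · rw [eq_false_of_ne_true h, (PySem.Chars.isIn_eq_false_iff _ _).mpr
      (fun hc => h ((infix_sg_iff_peak3 stock).mp hc))]

-- A's loop from index k+1 equals peak3 on the suffix from k
lemma loop_eq_peak3 (s : List Int) : ∀ (k : Nat),
    coneLoop s (PySem.List.pyRange ((k : Int) + 1) ((s.length : Int) - 1) 1) = peak3 (s.drop k) := by
  intro k
  induction hn : s.length - k using Nat.strong_induction_on generalizing k with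
  | _ n IH =>
  by_cases hlt : (k : Int) + 1 < (s.length : Int) - 1
  · have hk2 : k + 2 < s.length := by omega
    rw [PySem.List.pyRange_one_cons hlt]
    have h0 : (0 : Int) ≤ (k : Int) + 1 := by omega
    have g1 : PySem.List.pyGetD s ((k : Int) + 1) 0 = s[k + 1] := by
      rw [PySem.List.pyGetD_eq_getElem s 0 h0 (by omega)]
      congr 1 <;> omega
    have g0 : PySem.List.pyGetD s ((k : Int) + 1 - 1) 0 = s[k] := by
      rw [PySem.List.pyGetD_eq_getElem s 0 (by omega) (by omega)]
      congr 1 <;> omega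
    have g2 : PySem.List.pyGetD s ((k : Int) + 1 + 1) 0 = s[k + 2] := by
      rw [PySem.List.pyGetD_eq_getElem s 0 (by omega) (by omega)]
      congr 1 <;> omega
    have hdrop : s.drop k = s[k] :: s[k + 1] :: s[k + 2] :: s.drop (k + 3) := by
      rw [List.drop_eq_getElem_cons (by omega), List.drop_eq_getElem_cons (by omega),
          List.drop_eq_getElem_cons (by omega)]
    have hdrop1 : s.drop (k + 1) = s[k + 1] :: s[k + 2] :: s.drop (k + 3) := by
      rw [List.drop_eq_getElem_cons (by omega), List.drop_eq_getElem_cons (by omega)]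
    have hrec : coneLoop s (PySem.List.pyRange (((k + 1 : Nat) : Int) + 1) ((s.length : Int) - 1) 1)
        = peak3 (s.drop (k + 1)) := IH (s.length - (k + 1)) (by omega) (k + 1) rfl
    rw [hdrop]
    simp only [coneLoop, peak3, g0, g1, g2]
    by_cases h : s[k + 1] > s[k] ∧ s[k + 1] > s[k + 2]
    · rw [if_pos h, if_pos h]
    · rw [if_neg h, if_neg h]
      have : ((k : Int) + 1) + 1 = ((k + 1 : Nat) : Int) + 1 := by push_cast; ring
      rw [this, hrec, hdrop1]
  · rw [PySem.List.pyRange_one_eq_nil (by omega)]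
    rw [peak3_short _ (by simp [List.length_drop]; omega)]
    rfl

lemma a_eq_peak3 (stock : List Int) : coneCheck stock = peak3 stock := by
  unfold coneCheck
  by_cases h : (stock.length : Int) < 3
  · rw [if_pos h, peak3_short _ (by omega)]
  · rw [if_neg h]
    have := loop_eq_peak3 stock 0
    simpa using this

-- ===== VERDICT (by name: the statement is the Claim_ definition above) =====
theorem coneCheck_spec : Claim_equal_coneCheck := by
  intro stock _
  unfold Spec_coneCheck
  rw [a_eq_peak3, alt_eq_peak3]
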